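-- pv_equiv track=rewrite | github.com/humbertoschoenwald/itam-planner | apps/api/src/itam_planner_api/pipeline/builder.py | _changed_source_ids
-- ===== SOURCE A (Python) =====
-- def _changed_source_ids(
--     previous_fingerprints: dict[str, str] | None, current_fingerprints: dict[str, str]
-- ) -> list[str]:
--     if previous_fingerprints is None:
--         return sorted(current_fingerprints)
--     source_ids = set(previous_fingerprints) | set(current_fingerprints)
--     return sorted(
--         source_id
--         for source_id in source_ids
--         if previous_fingerprints.get(source_id) != current_fingerprints.get(source_id)
--     )
-- ===== SOURCE B (Python) =====
-- def _changed_source_ids(previous_fingerprints, current_fingerprints):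
--     if previous_fingerprints is None:
--         return sorted(current_fingerprints)
--     pk = sorted(previous_fingerprints)
--     ck = sorted(current_fingerprints)
--     out = []
--     i = j = 0
--     while i < len(pk) and j < len(ck):
--         a, b = pk[i], ck[j]
--         if a < b:
--             out.append(a)
--             i += 1
--         elif b < a:
--             out.append(b)
--             j += 1
--         else:
--             if previous_fingerprints[a] != current_fingerprints[a]:
--                 out.append(a)
--             i += 1
--             j += 1
--     out.extend(pk[i:])
--     out.extend(ck[j:])
--     return out
-- ===== Notes on version B (the rewrite author's own statement) =====
-- stated objective: alternative
-- what changed: Replaces A's filter-the-union-then-sort with a two-pointer merge of the two sorted key lists that emits the result already in sorted order (keys unique to one side emitted unconditionally, common keys only when the values differ), so no set union and no final sort of the diff is performed.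
import Mathlib
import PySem

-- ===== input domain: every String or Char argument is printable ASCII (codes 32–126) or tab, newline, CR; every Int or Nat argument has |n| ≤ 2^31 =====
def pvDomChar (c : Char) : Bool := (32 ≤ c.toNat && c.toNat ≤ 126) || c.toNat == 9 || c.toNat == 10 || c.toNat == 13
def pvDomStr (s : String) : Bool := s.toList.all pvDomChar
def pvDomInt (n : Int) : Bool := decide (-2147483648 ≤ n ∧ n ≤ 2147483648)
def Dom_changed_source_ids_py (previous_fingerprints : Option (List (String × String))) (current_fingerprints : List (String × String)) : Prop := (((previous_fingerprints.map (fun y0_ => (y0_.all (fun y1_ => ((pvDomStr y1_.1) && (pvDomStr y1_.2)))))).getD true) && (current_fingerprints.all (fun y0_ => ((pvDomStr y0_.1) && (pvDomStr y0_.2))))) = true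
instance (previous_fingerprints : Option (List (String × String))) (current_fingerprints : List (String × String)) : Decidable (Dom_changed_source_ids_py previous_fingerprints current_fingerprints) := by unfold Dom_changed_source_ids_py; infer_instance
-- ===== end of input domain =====

-- B replaces A's filter-the-union-then-sort by a two-pointer merge of the two
-- sorted key lists that emits the changed ids already in sorted order
-- (alternative structure, same asymptotic cost).
-- Pre_ excludes association lists with duplicate keys, which represent no Python dict.


-- ===== PORT A =====
def changed_source_ids_py (previous_fingerprints : Option (List (String × String))) (current_fingerprints : List (String × String)) : List String :=
  match previous_fingerprints with
  | none => PySem.List.sorted (current_fingerprints.map Prod.fst) (fun x => x) false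
  | some prev =>
      let source_ids : PySem.Set String :=
        PySem.Set.union (PySem.Set.ofList (prev.map Prod.fst))
                        (PySem.Set.ofList (current_fingerprints.map Prod.fst))
      PySem.List.sorted
        (source_ids.filter (fun source_id =>
          decide ((PySem.Dict.mk prev).get? source_id ≠ (PySem.Dict.mk current_fingerprints).get? source_id)))
        (fun x => x) false

-- ===== PORT B =====
-- two-pointer merge of the sorted key lists (Source B's while loop; the two
-- trailing out.extend calls are the [], js / a :: is, [] base cases)
def pvMergeChanged (prevD curD : PySem.Dict String String) : List String → List String → List String
  | [], js => js
  | a :: is, [] => a :: is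
  | a :: is, b :: js =>
      if a < b then a :: pvMergeChanged prevD curD is (b :: js)
      else if b < a then b :: pvMergeChanged prevD curD (a :: is) js
      else if prevD.get? a ≠ curD.get? a then a :: pvMergeChanged prevD curD is js
      else pvMergeChanged prevD curD is js
termination_by is js => is.length + js.length

def changed_source_ids_py_alt (previous_fingerprints : Option (List (String × String))) (current_fingerprints : List (String × String)) : List String :=
  match previous_fingerprints with
  | none => PySem.List.sorted (current_fingerprints.map Prod.fst) (fun x => x) false
  | some prev =>
      let pk := PySem.List.sorted (prev.map Prod.fst) (fun x => x) false
      let ck := PySem.List.sorted (current_fingerprints.map Prod.fst) (fun x => x) false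
      pvMergeChanged (PySem.Dict.mk prev) (PySem.Dict.mk current_fingerprints) pk ck

-- ===== PRECONDITION & SPEC =====
-- Pre_ excludes association lists with duplicate keys: a Python dict cannot have
-- duplicate keys, so such lists correspond to no input A ever receives.
def Pre_changed_source_ids_py (previous_fingerprints : Option (List (String × String))) (current_fingerprints : List (String × String)) : Prop :=
  ((previous_fingerprints.getD []).map Prod.fst).Nodup ∧ (current_fingerprints.map Prod.fst).Nodup
instance (previous_fingerprints : Option (List (String × String))) (current_fingerprints : List (String × String)) : Decidable (Pre_changed_source_ids_py previous_fingerprints current_fingerprints) := by unfold Pre_changed_source_ids_py; infer_instance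

def pvWitness_changed_source_ids_py : (Option (List (String × String))) × (List (String × String)) :=
  (some [("a", "1"), ("b", "2")], [("a", "1"), ("c", "3")])

def Spec_changed_source_ids_py (previous_fingerprints : Option (List (String × String))) (current_fingerprints : List (String × String)) (out : List String) : Prop := out = changed_source_ids_py_alt previous_fingerprints current_fingerprints
instance (previous_fingerprints : Option (List (String × String))) (current_fingerprints : List (String × String)) (out : List String) : Decidable (Spec_changed_source_ids_py previous_fingerprints current_fingerprints out) := by unfold Spec_changed_source_ids_py; infer_instance

-- ===== CLAIM (what is proved, stated in full; the proofs are below) =====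
def Claim_equal_changed_source_ids_py : Prop := ∀ (previous_fingerprints : Option (List (String × String))) (current_fingerprints : List (String × String)), Dom_changed_source_ids_py previous_fingerprints current_fingerprints → Pre_changed_source_ids_py previous_fingerprints current_fingerprints → Spec_changed_source_ids_py previous_fingerprints current_fingerprints (changed_source_ids_py previous_fingerprints current_fingerprints)

-- ===== LEMMAS AND PROOFS =====

-- a key is among a dict's keys iff first-match lookup succeeds
theorem pv_mem_keys_iff_get?_ne_none (l : List (String × String)) (k : String) :
    k ∈ l.map Prod.fst ↔ (PySem.Dict.mk l).get? k ≠ none := by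
  simp only [PySem.Dict.get?, ne_eq, Option.map_eq_none_iff, List.find?_eq_none, beq_iff_eq,
    List.mem_map, not_forall]
  constructor
  · rintro ⟨⟨a, b⟩, hmem, rfl⟩; exact ⟨(a, b), hmem, by simp⟩
  · rintro ⟨⟨a, b⟩, hmem, h⟩; exact ⟨(a, b), hmem, by simpa using h⟩

theorem pvMergeChanged_subset (pD cD : PySem.Dict String String)
    (l1 l2 : List String) (x : String)
    (hx : x ∈ pvMergeChanged pD cD l1 l2) : x ∈ l1 ∨ x ∈ l2 := by
  fun_induction pvMergeChanged pD cD l1 l2 with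
  | case1 js => exact Or.inr hx
  | case2 a is => exact Or.inl hx
  | case3 a is b js hlt ih =>
      rcases List.mem_cons.mp hx with h | h
      · exact Or.inl (by simp [h])
      · rcases ih h with h' | h' <;> [exact Or.inl (by simp [h']); exact Or.inr h']
  | case4 a is b js hlt hgt ih =>
      rcases List.mem_cons.mp hx with h | h
      · exact Or.inr (by simp [h])
      · rcases ih h with h' | h' <;> [exact Or.inl h'; exact Or.inr (by simp [h'])]
  | case5 a is b js hlt hgt hne ih =>
      rcases List.mem_cons.mp hx with h | h
      · exact Or.inl (by simp [h])
      · rcases ih h with h' | h' <;> [exact Or.inl (by simp [h']); exact Or.inr (by simp [h'])]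
  | case6 a is b js hlt hgt hne ih =>
      rcases ih hx with h' | h' <;> [exact Or.inl (by simp [h']); exact Or.inr (by simp [h'])]

theorem pvMergeChanged_pairwise (pD cD : PySem.Dict String String)
    (l1 l2 : List String)
    (h1 : l1.Pairwise (· < ·)) (h2 : l2.Pairwise (· < ·)) :
    (pvMergeChanged pD cD l1 l2).Pairwise (· < ·) := by
  fun_induction pvMergeChanged pD cD l1 l2 with
  | case1 js => exact h2
  | case2 a is => exact h1
  | case3 a is b js hlt ih =>
      rcases List.pairwise_cons.mp h1 with ⟨ha, his⟩
      refine List.pairwise_cons.mpr ⟨?_, ih his h2⟩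
      intro y hy
      rcases pvMergeChanged_subset _ _ _ _ _ hy with h | h
      · exact ha y h
      · rcases List.mem_cons.mp h with rfl | h
        · exact hlt
        · exact lt_trans hlt ((List.pairwise_cons.mp h2).1 y h)
  | case4 a is b js hlt hgt ih =>
      rcases List.pairwise_cons.mp h2 with ⟨hb, hjs⟩
      refine List.pairwise_cons.mpr ⟨?_, ih h1 hjs⟩
      intro y hy
      rcases pvMergeChanged_subset _ _ _ _ _ hy with h | h
      · rcases List.mem_cons.mp h with rfl | h
        · exact hgt
        · exact lt_trans hgt ((List.pairwise_cons.mp h1).1 y h)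
      · exact hb y h
  | case5 a is b js hlt hgt hne ih =>
      have hab : a = b := le_antisymm (le_of_not_gt hgt) (le_of_not_gt hlt)
      rcases List.pairwise_cons.mp h1 with ⟨ha, his⟩
      rcases List.pairwise_cons.mp h2 with ⟨hb, hjs⟩
      refine List.pairwise_cons.mpr ⟨?_, ih his hjs⟩
      intro y hy
      rcases pvMergeChanged_subset _ _ _ _ _ hy with h | h
      · exact ha y h
      · exact hab ▸ hb y h
  | case6 a is b js hlt hgt hne ih =>
      exact ih (List.pairwise_cons.mp h1).2 (List.pairwise_cons.mp h2).2

theorem pvMergeChanged_mem (pD cD : PySem.Dict String String)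
    (l1 l2 : List String)
    (h1 : l1.Pairwise (· < ·)) (h2 : l2.Pairwise (· < ·)) (x : String) :
    x ∈ pvMergeChanged pD cD l1 l2 ↔
      (x ∈ l1 ∨ x ∈ l2) ∧ (x ∈ l1 ∧ x ∈ l2 → pD.get? x ≠ cD.get? x) := by
  fun_induction pvMergeChanged pD cD l1 l2 with
  | case1 js => simp
  | case2 a is => simp
  | case3 a is b js hlt ih =>
      rcases List.pairwise_cons.mp h1 with ⟨ha, his⟩
      have hanb : a ∉ b :: js := by
        intro h
        rcases List.mem_cons.mp h with rfl | h
        · exact absurd hlt (lt_irrefl a)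
        · exact absurd (lt_trans hlt ((List.pairwise_cons.mp h2).1 a h)) (lt_irrefl a)
      rw [List.mem_cons, ih his h2]
      constructor
      · rintro (rfl | ⟨hm, hc⟩)
        · exact ⟨Or.inl (List.mem_cons_self), fun ⟨_, hx2⟩ => absurd hx2 hanb⟩
        · refine ⟨?_, ?_⟩
          · rcases hm with h | h
            · exact Or.inl (List.mem_cons_of_mem _ h)
            · exact Or.inr h
          · rintro ⟨hx1, hx2⟩
            rcases List.mem_cons.mp hx1 with rfl | hx1
            · exact absurd hx2 hanb
            · exact hc ⟨hx1, hx2⟩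
      · rintro ⟨hm, hc⟩
        rcases hm with h | h
        · rcases List.mem_cons.mp h with rfl | h
          · exact Or.inl rfl
          · refine Or.inr ⟨Or.inl h, ?_⟩
            rintro ⟨hx1, hx2⟩; exact hc ⟨List.mem_cons_of_mem _ hx1, hx2⟩
        · refine Or.inr ⟨Or.inr h, ?_⟩
          rintro ⟨hx1, hx2⟩; exact hc ⟨List.mem_cons_of_mem _ hx1, hx2⟩
  | case4 a is b js hlt hgt ih =>
      rcases List.pairwise_cons.mp h2 with ⟨hb, hjs⟩
      have hbna : b ∉ a :: is := by
        intro h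
        rcases List.mem_cons.mp h with rfl | h
        · exact absurd hgt (lt_irrefl b)
        · exact absurd (lt_trans hgt ((List.pairwise_cons.mp h1).1 b h)) (lt_irrefl b)
      rw [List.mem_cons, ih h1 hjs]
      constructor
      · rintro (rfl | ⟨hm, hc⟩)
        · exact ⟨Or.inr (List.mem_cons_self), fun ⟨hx1, _⟩ => absurd hx1 hbna⟩
        · refine ⟨?_, ?_⟩
          · rcases hm with h | h
            · exact Or.inl h
            · exact Or.inr (List.mem_cons_of_mem _ h)
          · rintro ⟨hx1, hx2⟩
            rcases List.mem_cons.mp hx2 with rfl | hx2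
            · exact absurd hx1 hbna
            · exact hc ⟨hx1, hx2⟩
      · rintro ⟨hm, hc⟩
        rcases hm with h | h
        · refine Or.inr ⟨Or.inl h, ?_⟩
          rintro ⟨hx1, hx2⟩; exact hc ⟨hx1, List.mem_cons_of_mem _ hx2⟩
        · rcases List.mem_cons.mp h with rfl | h
          · exact Or.inl rfl
          · refine Or.inr ⟨Or.inr h, ?_⟩
            rintro ⟨hx1, hx2⟩; exact hc ⟨hx1, List.mem_cons_of_mem _ hx2⟩
  | case5 a is b js hlt hgt hne ih =>
      have hab : a = b := le_antisymm (le_of_not_gt hgt) (le_of_not_gt hlt)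
      subst hab
      rcases List.pairwise_cons.mp h1 with ⟨ha, his⟩
      rcases List.pairwise_cons.mp h2 with ⟨hb, hjs⟩
      have hais : a ∉ is := fun h => absurd (ha a h) (lt_irrefl a)
      have hajs : a ∉ js := fun h => absurd (hb a h) (lt_irrefl a)
      rw [List.mem_cons, ih his hjs]
      by_cases hx : x = a
      · subst hx
        simp [hais, hajs, hne]
      · simp only [List.mem_cons, hx, false_or]
  | case6 a is b js hlt hgt hne ih =>
      have hab : a = b := le_antisymm (le_of_not_gt hgt) (le_of_not_gt hlt)
      subst hab
      rw [not_ne_iff] at hne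
      rcases List.pairwise_cons.mp h1 with ⟨ha, his⟩
      rcases List.pairwise_cons.mp h2 with ⟨hb, hjs⟩
      have hais : a ∉ is := fun h => absurd (ha a h) (lt_irrefl a)
      have hajs : a ∉ js := fun h => absurd (hb a h) (lt_irrefl a)
      rw [ih his hjs]
      by_cases hx : x = a
      · subst hx
        simp [hais, hajs, hne]
      · simp only [List.mem_cons, hx, false_or]

-- ===== VERDICT (by name: the statement is the Claim_ definition above) =====
theorem changed_source_ids_py_spec : Claim_equal_changed_source_ids_py := by
  intro prev? cur _ hpre
  unfold Spec_changed_source_ids_py changed_source_ids_py changed_source_ids_py_alt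
  cases prev? with
  | none => rfl
  | some prev =>
      rcases hpre with ⟨hpn, hcn⟩
      simp only [Option.getD] at hpn
      set pk := PySem.List.sorted (prev.map Prod.fst) (fun x => x) false with hpk
      set ck := PySem.List.sorted (cur.map Prod.fst) (fun x => x) false with hck
      have hpk_nodup : pk.Nodup := ((PySem.List.sorted_perm _ _ _).nodup_iff).mpr hpn
      have hck_nodup : ck.Nodup := ((PySem.List.sorted_perm _ _ _).nodup_iff).mpr hcn
      have hpk_lt : pk.Pairwise (· < ·) := by
        have h := PySem.List.sorted_pairwise (xs := prev.map Prod.fst) (key := fun x => x)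
        exact (h.and hpk_nodup).imp (fun h => lt_of_le_of_ne h.1 h.2)
      have hck_lt : ck.Pairwise (· < ·) := by
        have h := PySem.List.sorted_pairwise (xs := cur.map Prod.fst) (key := fun x => x)
        exact (h.and hck_nodup).imp (fun h => lt_of_le_of_ne h.1 h.2)
      apply PySem.List.sorted_eq_of_perm_of_pairwise_lt
      · -- permutation
        have hm_nodup : (pvMergeChanged (PySem.Dict.mk prev) (PySem.Dict.mk cur) pk ck).Nodup :=
          (pvMergeChanged_pairwise _ _ _ _ hpk_lt hck_lt).imp ne_of_lt
      -- target nodup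
        have ht_nodup :
            ((PySem.Set.union (PySem.Set.ofList (prev.map Prod.fst))
              (PySem.Set.ofList (cur.map Prod.fst))).filter
              (fun k => decide ((PySem.Dict.mk prev).get? k ≠ (PySem.Dict.mk cur).get? k))).Nodup :=
          (PySem.Set.nodup_union _ _ (PySem.Set.nodup_ofList _)).filter _
        rw [List.perm_ext_iff_of_nodup hm_nodup ht_nodup]
        intro x
        rw [pvMergeChanged_mem _ _ _ _ hpk_lt hck_lt]
        have hxp : x ∈ pk ↔ x ∈ prev.map Prod.fst := PySem.List.mem_sorted _ _ _ x
        have hxc : x ∈ ck ↔ x ∈ cur.map Prod.fst := PySem.List.mem_sorted _ _ _ x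
        simp only [List.mem_filter, PySem.Set.mem_union, PySem.Set.mem_ofList, decide_eq_true_eq,
          hxp, hxc, pv_mem_keys_iff_get?_ne_none]
        cases hgp : (PySem.Dict.mk prev).get? x <;> cases hgc : (PySem.Dict.mk cur).get? x <;> simp
      · exact pvMergeChanged_pairwise _ _ _ _ hpk_lt hck_lt
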